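-- pv_equiv track=rewrite | github.com/seddonym/import-linter | src/importlinter/contracts/acyclic.py | _longest_common_package
-- ===== SOURCE A (Python) =====
-- from typing import Any, Optional
--
-- _PARENT_PACKAGE_FOR_MULTIPLE_ROOTS = "__root__"
--
-- def _is_child(module: str, parent: str) -> bool:
--     if parent == _PARENT_PACKAGE_FOR_MULTIPLE_ROOTS:
--         return True
--
--     return module == parent or module.startswith(f"{parent}.")
--
-- def _longest_common_package(modules: tuple[str, ...]) -> Optional[str]:
--     module_lists = [module.split(".") for module in modules]
--     index = 0
--
--     for index, module_part in enumerate(module_lists[0]):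
--         for other_module in module_lists[1:]:
--             if index + 1 > len(other_module) or module_part != other_module[index]:
--                 longest_common_package = ".".join(module_lists[0][:index])
--
--                 if longest_common_package == "":
--                     return None
--                 else:
--                     return longest_common_package
--
--     sorted_modules = sorted(modules, key=len)
--     return (
--         sorted_modules[0]
--         if all(_is_child(module=module, parent=sorted_modules[0]) for module in modules)
--         else None
--     )
-- ===== SOURCE B (Python) =====
-- from typing import Optional
--
-- def _longest_common_package(modules: tuple) -> Optional[str]:
--     parts_lists = [module.split(".") for module in modules]
--     common = []
--     for column in zip(*parts_lists):
--         if all(part == column[0] for part in column):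
--             common.append(column[0])
--         else:
--             break
--     return ".".join(common) or None
-- ===== Notes on version B (the rewrite author's own statement) =====
-- stated objective: simpler
-- what changed: B replaces A's index-based double loop plus the separate sort-by-length/_is_child fallback by a single column-wise scan over zip(*split parts), collecting the common prefix parts and joining them once.
-- intended difference: When the first module is the empty string and every module is empty or starts with '.', A's fallback returns the empty string '' while B returns None; None is intended since '' is not a package name and A's own mismatch branch deliberately converts '' to None. — e.g. on _longest_common_package([""]): A returns some "", B returns none
import Mathlib
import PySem

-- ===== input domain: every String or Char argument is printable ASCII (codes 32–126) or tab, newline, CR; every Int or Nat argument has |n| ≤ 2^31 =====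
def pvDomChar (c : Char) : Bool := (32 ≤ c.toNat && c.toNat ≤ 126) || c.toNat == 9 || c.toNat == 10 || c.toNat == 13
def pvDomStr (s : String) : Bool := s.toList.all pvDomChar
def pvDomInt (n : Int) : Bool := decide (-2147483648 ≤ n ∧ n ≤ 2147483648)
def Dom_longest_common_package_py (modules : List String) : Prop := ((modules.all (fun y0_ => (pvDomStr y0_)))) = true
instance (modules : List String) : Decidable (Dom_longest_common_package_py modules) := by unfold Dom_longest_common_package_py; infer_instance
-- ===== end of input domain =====

-- B replaces A's index double loop + sort/_is_child fallback by one column-wise scan over the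
-- zipped split parts (objective: simpler); B returns None where A returns '' (see D_) and on the
-- empty list, where A raises IndexError (excluded by Pre_).

-- ===== PORT A =====
-- _is_child; the f-string "f\"{parent}.\"" is ported at the char level (String ++ is kernel-opaque)
def is_child_py (module : String) (parent : String) : Bool :=
  if parent = "__root__" then true
  else decide (module = parent) || PySem.Chars.startswith module.toList (parent.toList ++ ['.'])

-- the inner 'for other_module in module_lists[1:]' with its early-return condition;
-- other_module[index] is guarded by the 'index + 1 > len(other_module)' short-circuit, so getD is exact here
def a_mismatch (rest : List (List String)) (index : Nat) (part : String) : Bool :=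
  rest.any (fun other => decide (index + 1 > other.length) || decide (part ≠ other.getD index ""))

-- 'for index, module_part in enumerate(module_lists[0])': some r = early return with r, none = loop finished
def a_loop (first : List String) (rest : List (List String)) : Nat → List String → Option (Option String)
  | _, [] => none
  | index, part :: ps =>
      if a_mismatch rest index part then
        some (if PySem.Str.join "." (first.take index) = "" then none
              else some (PySem.Str.join "." (first.take index)))
      else a_loop first rest (index + 1) ps

def longest_common_package_py (modules : List String) : Option String :=
  let module_lists := modules.map (fun m => (PySem.Str.split? m ".").getD [])  -- sep "." ≠ "": split? is always some
  match module_lists with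
  | [] => none  -- Python raises IndexError on module_lists[0]; excluded by Pre_
  | first :: rest =>
    match a_loop first rest 0 first with
    | some r => r
    | none =>
      let sorted_modules := PySem.List.sorted modules (fun m => PySem.Str.len m) false
      let shortest := sorted_modules.headD ""   -- sorted_modules[0]; nonempty here since modules ≠ []
      if modules.all (fun m => is_child_py m shortest) then some shortest else none

-- ===== PORT B =====
-- zip(*parts_lists): one column at a time, stopping as soon as any list is exhausted
def zip_star_go : List String → List (List String) → List (List String)
  | [], _ => []
  | x :: xs, rest =>
      if rest.any (·.isEmpty) then []
      else (x :: rest.map (fun l => l.headD "")) :: zip_star_go xs (rest.map List.tail)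

def zip_star (lists : List (List String)) : List (List String) :=
  match lists with
  | [] => []   -- zip() of no lists is empty
  | first :: rest => zip_star_go first rest

-- the for/break loop collecting the common prefix parts
def b_loop : List (List String) → List String → List String
  | [], common => common
  | col :: cols, common =>
      if col.all (fun p => decide (p = col.headD "")) then b_loop cols (common ++ [col.headD ""])
      else common

def longest_common_package_py_alt (modules : List String) : Option String :=
  let parts_lists := modules.map (fun m => (PySem.Str.split? m ".").getD [])
  let common := b_loop (zip_star parts_lists) []
  if PySem.Str.join "." common = "" then none else some (PySem.Str.join "." common)  -- '… or None'

-- ===== PRECONDITION & SPEC =====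
-- Pre_ excludes only the empty list, on which Python A raises IndexError (module_lists[0]).
def Pre_longest_common_package_py (modules : List String) : Prop := modules ≠ []
instance (modules : List String) : Decidable (Pre_longest_common_package_py modules) := by
  unfold Pre_longest_common_package_py; infer_instance
def pvWitness_longest_common_package_py : List String := ["mypkg.a.b", "mypkg.a.c"]

-- When the first module is "" and every module is "" or starts with ".", A's fallback returns ""
-- while B returns none; none is intended ('' is not a package name, and A's own mismatch branch
-- deliberately converts '' to None).
def D_longest_common_package_py (modules : List String) : Prop :=
  modules ≠ [] ∧ modules.headD "x" = "" ∧
    ∀ m ∈ modules, m = "" ∨ PySem.Str.startswith m "." = true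
instance (modules : List String) : Decidable (D_longest_common_package_py modules) := by
  unfold D_longest_common_package_py; infer_instance

def Spec_longest_common_package_py (modules : List String) (out : Option String) : Prop :=
  ¬ D_longest_common_package_py modules → out = longest_common_package_py_alt modules
instance (modules : List String) (out : Option String) :
    Decidable (Spec_longest_common_package_py modules out) := by
  unfold Spec_longest_common_package_py; infer_instance

def pvDiffWitness_longest_common_package_py : List String := [""]
def pvDiffWitnessOut_longest_common_package_py : (Option String) × (Option String) := (some "", none)

-- ===== CLAIM (what is proved, stated in full; the proofs are below) =====
def Claim_unchanged_longest_common_package_py : Prop :=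
  ∀ (modules : List String), Dom_longest_common_package_py modules →
    Pre_longest_common_package_py modules →
    Spec_longest_common_package_py modules (longest_common_package_py modules)
def Claim_changed_longest_common_package_py : Prop :=
  Dom_longest_common_package_py (pvDiffWitness_longest_common_package_py) ∧
  Pre_longest_common_package_py (pvDiffWitness_longest_common_package_py) ∧
  D_longest_common_package_py (pvDiffWitness_longest_common_package_py) ∧
  longest_common_package_py (pvDiffWitness_longest_common_package_py) = pvDiffWitnessOut_longest_common_package_py.1 ∧
  longest_common_package_py_alt (pvDiffWitness_longest_common_package_py) = pvDiffWitnessOut_longest_common_package_py.2 ∧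
  pvDiffWitnessOut_longest_common_package_py.1 ≠ pvDiffWitnessOut_longest_common_package_py.2
def Claim_exact_longest_common_package_py : Prop :=
  ∀ (modules : List String), Dom_longest_common_package_py modules →
    Pre_longest_common_package_py modules → D_longest_common_package_py modules →
    longest_common_package_py modules ≠ longest_common_package_py_alt modules

-- ===== LEMMAS AND PROOFS =====

-- Chars-level facts about splitOn/join
theorem pv_go_ne_nil (sep : List Char) (fuel : Nat) (l cur : List Char) (acc : List (List Char)) :
    PySem.Chars.splitOn.go sep fuel l cur acc ≠ [] := by
  induction fuel generalizing l cur acc with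
  | zero => simp [PySem.Chars.splitOn.go]
  | succ fuel ih =>
    cases l with
    | nil => simp [PySem.Chars.splitOn.go]
    | cons c rest =>
      rw [PySem.Chars.splitOn.go]
      split
      · exact ih _ _ _
      · exact ih _ _ _

theorem pv_go_acc (sep : List Char) (fuel : Nat) (l cur : List Char) (acc : List (List Char)) :
    PySem.Chars.splitOn.go sep fuel l cur acc = acc.reverse ++ PySem.Chars.splitOn.go sep fuel l cur [] := by
  induction fuel generalizing l cur acc with
  | zero => simp [PySem.Chars.splitOn.go]
  | succ fuel ih =>
    cases l with
    | nil => simp [PySem.Chars.splitOn.go]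
    | cons c rest =>
      rw [PySem.Chars.splitOn.go]
      conv_rhs => rw [PySem.Chars.splitOn.go]
      split
      · rw [ih _ _ (cur.reverse :: acc), ih _ _ [cur.reverse]]
        simp
      · exact ih _ _ _

theorem pv_join_cons₂ (sep x y : List Char) (t : List (List Char)) :
    PySem.Chars.join sep (x :: y :: t) = x ++ sep ++ PySem.Chars.join sep (y :: t) := by
  simp [PySem.Chars.join, List.intercalate, List.intersperse]

theorem pv_join_cons_ne (sep x : List Char) (t : List (List Char)) (ht : t ≠ []) :
    PySem.Chars.join sep (x :: t) = x ++ sep ++ PySem.Chars.join sep t := by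
  cases t with
  | nil => exact absurd rfl ht
  | cons y t' => exact pv_join_cons₂ sep x y t'

theorem pv_join_append (sep : List Char) (a b : List (List Char)) (ha : a ≠ []) (hb : b ≠ []) :
    PySem.Chars.join sep (a ++ b) = PySem.Chars.join sep a ++ sep ++ PySem.Chars.join sep b := by
  induction a with
  | nil => exact absurd rfl ha
  | cons x a' ih =>
    cases a' with
    | nil => simpa using pv_join_cons_ne sep x b hb
    | cons y a'' =>
      rw [List.cons_append, pv_join_cons_ne sep x _ (by simp), pv_join_cons₂ sep x y a'', ih (by simp)]
      simp

theorem pv_join_go (sep : List Char) (hsep : sep ≠ []) (fuel : Nat) :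
    ∀ (l cur : List Char), l.length < fuel →
      PySem.Chars.join sep (PySem.Chars.splitOn.go sep fuel l cur []) = cur.reverse ++ l := by
  induction fuel with
  | zero => intro l cur h; omega
  | succ fuel ih =>
    intro l cur h
    cases l with
    | nil => simp [PySem.Chars.splitOn.go]
    | cons c rest =>
      rw [PySem.Chars.splitOn.go]
      split
      · rename_i hpre
        have hs1 : 0 < sep.length := List.length_pos_of_ne_nil hsep
        have hlt : (List.drop sep.length (c :: rest)).length < fuel := by
          simp only [List.length_drop, List.length_cons]
          simp only [List.length_cons] at h
          omega
        rw [pv_go_acc]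
        have hrev : (([] : List Char).reverse :: ([] : List (List Char))).reverse = [[]] := by simp
        obtain ⟨t, ht⟩ := List.isPrefixOf_iff_prefix.mp hpre
        rw [show ((cur.reverse :: ([] : List (List Char))).reverse) = [cur.reverse] by simp,
            List.singleton_append, pv_join_cons_ne sep _ _ (pv_go_ne_nil _ _ _ _ _), ih _ _ hlt]
        have hp : sep ++ List.drop sep.length (c :: rest) = c :: rest := by
          rw [← ht, List.drop_left]
        simp only [List.reverse_nil, List.nil_append]
        rw [List.append_assoc, hp]
      · have := ih rest (c :: cur) (by simpa using Nat.lt_of_succ_lt_succ h)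
        rw [this]
        simp

theorem pv_join_splitOn (sep : List Char) (hsep : sep ≠ []) (s : List Char) :
    PySem.Chars.join sep (PySem.Chars.splitOn s sep) = s := by
  rw [PySem.Chars.splitOn]
  simpa using pv_join_go sep hsep (s.length + 1) s [] (by omega)

theorem pv_splitOn_ne_nil (s sep : List Char) : PySem.Chars.splitOn s sep ≠ [] := by
  rw [PySem.Chars.splitOn]; exact pv_go_ne_nil _ _ _ _ _

theorem pv_splitOn_nil (sep : List Char) : PySem.Chars.splitOn [] sep = [[]] := by
  simp [PySem.Chars.splitOn, PySem.Chars.splitOn.go]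

theorem pv_splitOn_head_dot (r : List Char) :
    ∃ t, PySem.Chars.splitOn ('.' :: r) ['.'] = [] :: t := by
  rw [PySem.Chars.splitOn, PySem.Chars.splitOn.go]
  split
  · rw [pv_go_acc]
    exact ⟨_, rfl⟩
  · rename_i hpre
    simp [List.isPrefixOf] at hpre

-- Str-level bridge facts
theorem pv_split_eq (m : String) :
    (PySem.Str.split? m ".").getD [] = (PySem.Chars.splitOn m.toList ['.']).map String.ofList := by
  have : (".".toList : List Char) = ['.'] := rfl
  simp [PySem.Str.split?, PySem.Chars.split?, this]

theorem pv_joinS (F : List (List Char)) :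
    PySem.Str.join "." (F.map String.ofList) = String.ofList (PySem.Chars.join ['.'] F) := by
  have : (".".toList : List Char) = ['.'] := rfl
  simp only [PySem.Str.join, List.map_map, this]
  congr 1
  congr 1
  have : (String.toList ∘ String.ofList) = fun l : List Char => l := by
    funext l; simp [Function.comp, String.toList_ofList]
  rw [this]
  simp

theorem pv_join_parse (m : String) :
    PySem.Str.join "." ((PySem.Str.split? m ".").getD []) = m := by
  rw [pv_split_eq, pv_joinS, pv_join_splitOn ['.'] (by simp) m.toList, String.ofList_toList]

-- prefix of split parts gives the string-level relation
theorem pv_prefix_cases (a b : String)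
    (h : PySem.Chars.splitOn a.toList ['.'] <+: PySem.Chars.splitOn b.toList ['.']) :
    b = a ∨ (a.toList ++ ['.']) <+: b.toList := by
  obtain ⟨t, ht⟩ := h
  cases t with
  | nil =>
    left
    have : PySem.Chars.join ['.'] (PySem.Chars.splitOn b.toList ['.']) =
        PySem.Chars.join ['.'] (PySem.Chars.splitOn a.toList ['.']) := by
      rw [← ht]; simp
    rw [pv_join_splitOn ['.'] (by simp), pv_join_splitOn ['.'] (by simp)] at this
    have := congrArg String.ofList this
    simpa [String.ofList_toList] using this
  | cons p t' =>
    right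
    have hb : b.toList = PySem.Chars.join ['.'] (PySem.Chars.splitOn a.toList ['.'] ++ (p :: t')) := by
      rw [ht, pv_join_splitOn ['.'] (by simp)]
    rw [pv_join_append ['.'] _ _ (pv_splitOn_ne_nil _ _) (by simp),
        pv_join_splitOn ['.'] (by simp)] at hb
    exact ⟨_, hb.symm⟩

-- shared abbreviation for the final ''-to-None conversion both programs perform
def pv_postJoin (c : List String) : Option String :=
  if PySem.Str.join "." c = "" then none else some (PySem.Str.join "." c)

-- if A's loop finishes, the first module's remaining parts are a prefix of every other module's parts
theorem pv_aloop_none_prefix (suf : List String) :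
    ∀ (first : List String) (rest : List (List String)) (i : Nat),
      first.drop i = suf → a_loop first rest i suf = none →
      ∀ other ∈ rest, suf <+: other.drop i := by
  induction suf with
  | nil => intro first rest i _ _ other _; simp
  | cons part ps ih =>
    intro first rest i hdrop hnone other hmem
    rw [a_loop] at hnone
    by_cases hm : a_mismatch rest i part = true
    · simp [hm] at hnone
    · simp only [hm, if_false, Bool.false_eq_true] at hnone
      have hfacts := (by simpa [a_mismatch, not_or] using hm : ∀ o ∈ rest, ¬ i + 1 > o.length ∧ part = o.getD i "")
      obtain ⟨hlen, hpart⟩ := hfacts other hmem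
      have hi : i < other.length := by omega
      have hdrop1 : first.drop (i + 1) = ps := by
        rw [← List.tail_drop, hdrop]; rfl
      have hrec := ih first rest (i + 1) hdrop1 hnone other hmem
      have : other.drop i = other[i] :: other.drop (i + 1) := List.drop_eq_getElem_cons hi
      rw [this, ← List.tail_drop] at *
      rw [List.getD_eq_getElem?_getD, List.getElem?_eq_getElem hi] at hpart
      simp at hpart
      rw [this, hpart]
      obtain ⟨t, htl⟩ := hrec
      exact ⟨t, by rw [List.cons_append, htl]⟩

-- the central loop correspondence: A's indexed double loop vs B's column scan, from index i on
theorem pv_loop_rel (suf : List String) :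
    ∀ (first : List String) (rest : List (List String)) (i : Nat),
      first.drop i = suf →
      (a_loop first rest i suf = none ∧
        b_loop (zip_star_go suf (rest.map (List.drop i))) (first.take i) = first)
      ∨ (∃ j, a_loop first rest i suf = some (pv_postJoin (first.take j)) ∧
          b_loop (zip_star_go suf (rest.map (List.drop i))) (first.take i) = first.take j) := by
  induction suf with
  | nil =>
    intro first rest i hdrop
    left
    refine ⟨rfl, ?_⟩
    rw [zip_star_go, b_loop]
    exact List.take_of_length_le (List.drop_eq_nil_iff.mp hdrop)
  | cons part ps ih =>
    intro first rest i hdrop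
    have hi : i < first.length := by
      by_contra h
      rw [List.drop_eq_nil_iff.mpr (by omega)] at hdrop
      exact List.cons_ne_nil _ _ hdrop.symm
    have hcons := List.drop_eq_getElem_cons hi
    rw [hdrop] at hcons
    have hgetfirst : first[i] = part := by
      have := hcons
      injection this with h1 h2
      exact h1.symm
    have hdrop1 : first.drop (i + 1) = ps := by
      injection hcons with h1 h2
      exact h2.symm
    have htake1 : first.take (i + 1) = first.take i ++ [part] := by
      rw [List.take_add_one, List.getElem?_eq_getElem hi, hgetfirst]
      rfl
    rw [zip_star_go]
    by_cases hemp : (rest.map (List.drop i)).any (·.isEmpty) = true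
    · -- some other module has run out of parts: A's length check fires, B has no more columns
      right
      refine ⟨i, ?_, ?_⟩
      · have hmis : a_mismatch rest i part = true := by
          simp only [List.any_map, List.any_eq_true] at hemp
          obtain ⟨other, hmem, hempty⟩ := hemp
          have : other.length ≤ i := by
            simp only [Function.comp, List.isEmpty_iff, List.drop_eq_nil_iff] at hempty
            exact hempty
          simp only [a_mismatch, List.any_eq_true]
          exact ⟨other, hmem, by simp; omega⟩
        rw [a_loop, if_pos hmis]
        rfl
      · rw [if_pos hemp, b_loop]
    · -- a full column exists
      have hlens : ∀ other ∈ rest, i < other.length := by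
        intro other hmem
        by_contra h
        apply hemp
        simp only [List.any_map, List.any_eq_true]
        exact ⟨other, hmem, by simp [Function.comp, List.drop_eq_nil_iff]; omega⟩
      have hheads : ∀ other ∈ rest, (other.drop i).headD "" = other.getD i "" := by
        intro other hmem
        rw [List.drop_eq_getElem_cons (hlens other hmem), List.getD_eq_getElem?_getD,
            List.getElem?_eq_getElem (hlens other hmem)]
        rfl
      rw [if_neg hemp]
      have hcolhead :
          ((part :: (rest.map (List.drop i)).map (fun l => l.headD "")).headD "") = part := rfl
      have htails : (rest.map (List.drop i)).map List.tail = rest.map (List.drop (i + 1)) := by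
        rw [List.map_map]
        exact List.map_congr_left (fun o _ => by simp [Function.comp, List.tail_drop])
      by_cases hcol :
          (part :: (rest.map (List.drop i)).map (fun l => l.headD "")).all
            (fun p => decide (p = (part :: (rest.map (List.drop i)).map (fun l => l.headD "")).headD "")) = true
      · -- all parts in this column agree: both loops continue
        have hall : ∀ other ∈ rest, other.getD i "" = part := by
          intro other hmem
          simp only [hcolhead, List.all_cons, List.all_eq_true, Bool.and_eq_true, decide_eq_true_eq] at hcol
          have := hcol.2 ((other.drop i).headD "") (by
            simp only [List.map_map, List.mem_map]
            exact ⟨other, hmem, rfl⟩)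
          rw [← hheads other hmem]
          exact this
        have hmis : a_mismatch rest i part = false := by
          simp only [a_mismatch, List.any_eq_false]
          intro other hmem
          have h1 := hlens other hmem
          simp only [Bool.or_eq_true, decide_eq_true_eq, not_or, not_lt, ne_eq, not_not]
          exact ⟨by omega, (hall other hmem).symm⟩
        rw [a_loop, if_neg (by simp [hmis]), b_loop, if_pos hcol, hcolhead, htails, ← htake1]
        exact ih first rest (i + 1) hdrop1
      · -- mismatch in this column: both loops stop at i
        right
        refine ⟨i, ?_, ?_⟩
        · have hmis : a_mismatch rest i part = true := by
            simp only [hcolhead, List.all_cons, List.all_eq_true, Bool.and_eq_true,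
              decide_eq_true_eq, not_and, not_forall] at hcol
            have hcol' := hcol (by simp)
            obtain ⟨x, hx, hne⟩ := hcol'
            simp only [List.map_map, List.mem_map] at hx
            obtain ⟨other, hmem, hxeq⟩ := hx
            simp only [a_mismatch, List.any_eq_true]
            refine ⟨other, hmem, ?_⟩
            have hneq : other.getD i "" ≠ part := by
              rw [← hheads other hmem]
              subst hxeq
              simpa [Function.comp] using hne
            simp only [Bool.or_eq_true, decide_eq_true_eq]
            right
            exact fun h => hneq h.symm
          rw [a_loop, if_pos hmis]
          rfl
        · rw [b_loop, if_neg hcol]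

-- if A's loop finished, every module extends the first one (as a string)
theorem pv_prefix_all (m0 : String) (ms : List String)
    (hnone : a_loop ((PySem.Str.split? m0 ".").getD [])
        (ms.map (fun m => (PySem.Str.split? m ".").getD [])) 0
        ((PySem.Str.split? m0 ".").getD []) = none) :
    ∀ m ∈ m0 :: ms, m = m0 ∨ (m0.toList ++ ['.']) <+: m.toList := by
  intro m hmem
  rcases List.mem_cons.mp hmem with h | h
  · left; exact h
  · have hp := pv_aloop_none_prefix _ _ _ 0 (by simp) hnone
      ((PySem.Str.split? m ".").getD []) (List.mem_map_of_mem h)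
    simp only [List.drop_zero] at hp
    rw [pv_split_eq, pv_split_eq] at hp
    have hp' := hp.map String.toList
    simp only [List.map_map] at hp'
    have hid : (String.toList ∘ String.ofList) = fun l : List Char => l := by
      funext l; simp [Function.comp, String.toList_ofList]
    rw [hid] at hp'
    simp only [List.map_id_fun'] at hp'
    have := pv_prefix_cases m0 m (by simpa using hp')
    rcases this with h' | h'
    · left; exact h'
    · right; exact h'

-- the sort-by-length fallback returns exactly the first module
theorem pv_fallback (m0 : String) (ms : List String)
    (hpre : ∀ m ∈ m0 :: ms, m = m0 ∨ (m0.toList ++ ['.']) <+: m.toList) :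
    (if (m0 :: ms).all (fun m => is_child_py m
          ((PySem.List.sorted (m0 :: ms) (fun m => PySem.Str.len m) false).headD ""))
     then some ((PySem.List.sorted (m0 :: ms) (fun m => PySem.Str.len m) false).headD "")
     else none) = some m0 := by
  have hlen : ∀ m ∈ m0 :: ms, m ≠ m0 → m0.toList.length + 1 ≤ m.toList.length := by
    intro m hmem hne
    rcases hpre m hmem with h | h
    · exact absurd h hne
    · have := h.length_le
      simpa using this
  have hperm := PySem.List.sorted_perm (m0 :: ms) (fun m => PySem.Str.len m) false
  have hsne : PySem.List.sorted (m0 :: ms) (fun m => PySem.Str.len m) false ≠ [] := by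
    intro h
    rw [h] at hperm
    exact List.cons_ne_nil _ _ (hperm.symm.eq_nil)
  obtain ⟨h0, t, hS⟩ : ∃ h0 t, PySem.List.sorted (m0 :: ms) (fun m => PySem.Str.len m) false = h0 :: t := by
    cases hSc : PySem.List.sorted (m0 :: ms) (fun m => PySem.Str.len m) false with
    | nil => exact absurd hSc hsne
    | cons a b => exact ⟨a, b, rfl⟩
  have hmem0 : h0 ∈ m0 :: ms := by
    rw [← PySem.List.mem_sorted (m0 :: ms) (fun m => PySem.Str.len m) false, hS]
    simp
  have hle := PySem.List.key_head_sorted_le (m0 :: ms) (fun m => PySem.Str.len m) hS m0 (by simp)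
  have h0eq : h0 = m0 := by
    by_contra hne
    have := hlen h0 hmem0 hne
    simp only [PySem.Str.len_eq] at hle
    omega
  rw [hS]
  simp only [List.headD_cons, h0eq]
  rw [if_pos]
  rw [List.all_eq_true]
  intro m hmem
  rw [is_child_py]
  split
  · rfl
  · rcases hpre m hmem with h | h
    · simp [h]
    · have : PySem.Chars.startswith m.toList (m0.toList ++ ['.']) = true :=
        (PySem.Chars.startswith_iff _ _).mpr h
      simp [this]

-- "" or a module starting with "." splits with "" as its first part
theorem pv_parse_head_empty (m : String) (h : m = "" ∨ PySem.Str.startswith m "." = true) :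
    ∃ t, (PySem.Str.split? m ".").getD [] = "" :: t := by
  rw [pv_split_eq]
  rcases h with h | h
  · subst h
    have : ("" : String).toList = [] := rfl
    rw [this, pv_splitOn_nil]
    exact ⟨[], rfl⟩
  · rw [PySem.Str.startswith_eq] at h
    have := (PySem.Chars.startswith_iff _ _).mp h
    obtain ⟨r, hr⟩ := this
    have hdot : (".".toList : List Char) = ['.'] := rfl
    rw [hdot] at hr
    obtain ⟨t, ht⟩ := pv_splitOn_head_dot r
    rw [show ('.' :: r : List Char) = ['.'] ++ r from rfl, hr] at ht
    rw [ht]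
    exact ⟨t.map String.ofList, rfl⟩

-- under D_, A's loop finishes at once (every column-0 entry is "")
theorem pv_aloop_none_of_D (m0 : String) (ms : List String)
    (h0 : m0 = "") (hall : ∀ m ∈ m0 :: ms, m = "" ∨ PySem.Str.startswith m "." = true) :
    a_loop ((PySem.Str.split? m0 ".").getD [])
      (ms.map (fun m => (PySem.Str.split? m ".").getD [])) 0
      ((PySem.Str.split? m0 ".").getD []) = none := by
  subst h0
  have hparse0 : ((PySem.Str.split? "" ".").getD []) = [""] := by decide
  rw [hparse0]
  have hmis : a_mismatch (ms.map (fun m => (PySem.Str.split? m ".").getD [])) 0 "" = false := by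
    simp only [a_mismatch, List.any_eq_false, List.mem_map]
    rintro other ⟨m, hmem, rfl⟩
    obtain ⟨t, ht⟩ := pv_parse_head_empty m (hall m (List.mem_cons_of_mem _ hmem))
    rw [ht]
    simp
  rw [a_loop, if_neg (by simp [hmis]), a_loop]

theorem pv_main (m0 : String) (ms : List String)
    (hnd : ¬ D_longest_common_package_py (m0 :: ms)) :
    longest_common_package_py (m0 :: ms) = longest_common_package_py_alt (m0 :: ms) := by
  have hrel := pv_loop_rel ((PySem.Str.split? m0 ".").getD [])
      ((PySem.Str.split? m0 ".").getD [])
      (ms.map (fun m => (PySem.Str.split? m ".").getD [])) 0 (by simp)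
  have hmap : (List.map (fun m => (PySem.Str.split? m ".").getD []) ms).map (List.drop 0)
      = List.map (fun m => (PySem.Str.split? m ".").getD []) ms := by simp
  rw [hmap, List.take_zero] at hrel
  simp only [longest_common_package_py, longest_common_package_py_alt, List.map_cons, zip_star]
  rcases hrel with ⟨ha, hb⟩ | ⟨j, ha, hb⟩
  · -- A's loop finished: A takes the sorted fallback, B joins all collected parts
    rw [ha, hb]
    have hall := pv_prefix_all m0 ms ha
    rw [pv_fallback m0 ms hall, pv_join_parse m0]
    have hm0 : m0 ≠ "" := by
      intro h0
      apply hnd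
      refine ⟨List.cons_ne_nil _ _, by simp [h0], ?_⟩
      intro m hmem
      rcases hall m hmem with h | h
      · left; rw [h, h0]
      · right
        rw [PySem.Str.startswith_eq, show (".".toList : List Char) = ['.'] from rfl]
        refine (PySem.Chars.startswith_iff _ _).mpr ?_
        rw [h0] at h
        exact h
    rw [if_neg hm0]
  · -- early return: both sides produce the same joined prefix (or None if empty)
    rw [ha, hb]
    rfl

theorem pv_tight (m0 : String) (ms : List String)
    (hd : D_longest_common_package_py (m0 :: ms)) :
    longest_common_package_py (m0 :: ms) ≠ longest_common_package_py_alt (m0 :: ms) := by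
  obtain ⟨-, hhead, hall⟩ := hd
  have h0 : m0 = "" := by simpa using hhead
  have hnone := pv_aloop_none_of_D m0 ms h0 hall
  have hrel := pv_loop_rel ((PySem.Str.split? m0 ".").getD [])
      ((PySem.Str.split? m0 ".").getD [])
      (ms.map (fun m => (PySem.Str.split? m ".").getD [])) 0 (by simp)
  have hmap : (List.map (fun m => (PySem.Str.split? m ".").getD []) ms).map (List.drop 0)
      = List.map (fun m => (PySem.Str.split? m ".").getD []) ms := by simp
  rw [hmap, List.take_zero] at hrel
  simp only [longest_common_package_py, longest_common_package_py_alt, List.map_cons, zip_star]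
  rcases hrel with ⟨ha, hb⟩ | ⟨j, ha, hb⟩
  · rw [ha, hb]
    have hallp := pv_prefix_all m0 ms ha
    rw [pv_fallback m0 ms hallp, pv_join_parse m0, if_pos h0]
    simp
  · rw [hnone] at ha
    exact absurd ha (by simp)

theorem longest_common_package_py_spec : Claim_unchanged_longest_common_package_py := by
  intro modules hdom hpre hnd
  cases modules with
  | nil => exact absurd rfl hpre
  | cons m0 ms => exact pv_main m0 ms hnd

-- ===== VERDICT (by name: the statement is the Claim_ definition above) =====
theorem longest_common_package_py_changed : Claim_changed_longest_common_package_py := by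
  unfold Claim_changed_longest_common_package_py; decide

theorem longest_common_package_py_tight : Claim_exact_longest_common_package_py := by
  intro modules hdom hpre hd
  cases modules with
  | nil => exact absurd rfl hpre
  | cons m0 ms => exact pv_tight m0 ms hd
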